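-- pv_equiv track=rewrite | github.com/Shubham-08/FstackAssignments | Problem_3.py | trips
-- ===== SOURCE A (Python) =====
-- import bisect;
--
-- def trips(N, salads, pizzas, cakes):
-- 	elements = [0] * N
-- 	uniqueTrips = 0
-- 	pizzas.sort()
-- 	cakes.sort()
-- 	for idx in range(N - 1, -1, -1):
-- 		temp = pizzas[idx] + 1
-- 		index = (bisect.bisect(cakes, temp))
-- 		if index < N:
-- 			elements[idx] = N - index
-- 		if idx + 1 < len(elements):
-- 			elements[idx] += elements[idx + 1]
--
-- 	for idx in range(0, N):
-- 		temp = salads[idx] + 1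
-- 		index = (bisect.bisect(pizzas, temp))
-- 		if index < N:
-- 			uniqueTrips += elements[index]
--
-- 	return (uniqueTrips)
-- ===== SOURCE B (Python) =====
-- def trips(N, salads, pizzas, cakes):
--     # One linear merge over the N smallest pizzas with two monotone pointers
--     # replaces A's suffix-sum table plus a binary search per salad.
--     # Like A, sorts pizzas and cakes in place and leaves salads unmutated.
--     pizzas.sort()
--     cakes.sort()
--     n = max(N, 0)
--     ss = sorted(salads[:n])
--     cs = cakes[:n]
--     i = 0
--     j = 0
--     total = 0
--     for p in pizzas[:n]:
--         while i < len(ss) and ss[i] + 1 < p: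
--             i += 1
--         while j < len(cs) and cs[j] <= p + 1:
--             j += 1
--         total += i * (len(cs) - j)
--     return total
-- ===== Notes on version B (the rewrite author's own statement) =====
-- stated objective: alternative
-- what changed: A builds a suffix-sum table over sorted pizzas and does a binary search per salad; B does one linear merge over the N smallest pizzas with two monotone pointers (into the sorted first-N salads and cakes), adding salad_count*(remaining cakes) per pizza, with no table and no per-salad binary search.
-- intended difference: When len(cakes) < N (and some of the first N salads is beaten by one of the N smallest pizzas), A counts N - len(cakes) phantom positions past the end of the cake list as cakes for every pizza and returns an inflated total; B counts only real cakes, the intended value. — e.g. on trips(1, [0], [5], []): A returns 1, B returns 0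
import Mathlib
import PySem

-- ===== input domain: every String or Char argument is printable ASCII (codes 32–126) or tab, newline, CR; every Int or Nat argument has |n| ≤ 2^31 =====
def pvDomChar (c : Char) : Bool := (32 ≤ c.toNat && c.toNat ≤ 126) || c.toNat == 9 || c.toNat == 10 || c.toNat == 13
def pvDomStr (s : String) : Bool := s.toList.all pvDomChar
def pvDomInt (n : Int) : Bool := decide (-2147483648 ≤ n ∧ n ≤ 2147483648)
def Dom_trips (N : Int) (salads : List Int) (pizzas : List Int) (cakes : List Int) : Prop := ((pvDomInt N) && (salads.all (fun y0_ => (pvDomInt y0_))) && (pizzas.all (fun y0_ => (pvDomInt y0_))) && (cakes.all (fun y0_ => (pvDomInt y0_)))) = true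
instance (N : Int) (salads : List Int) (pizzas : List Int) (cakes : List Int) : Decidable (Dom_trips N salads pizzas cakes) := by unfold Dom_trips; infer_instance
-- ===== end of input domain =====

-- B replaces A's suffix-sum table + per-salad binary search by one linear merge over the
-- N smallest pizzas with two monotone index pointers (alternative algorithm, same asymptotic
-- cost).  Like A, the Python B sorts pizzas and cakes in place and leaves salads unmutated;
-- the equivalence proved here is about the return value.


-- ===== PORT A =====
-- bisect.bisect is PySem.List.bisectRight
def trips (N : Int) (salads : List Int) (pizzas : List Int) (cakes : List Int) : Int :=
  let elements : List Int := List.replicate N.toNat 0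
  let uniqueTrips : Int := 0
  let P := PySem.List.sorted pizzas (fun x => x) false
  let C := PySem.List.sorted cakes (fun x => x) false
  let elements := (PySem.List.pyRange (N - 1) (-1) (-1)).foldl (fun el idx =>
    let temp := PySem.List.pyGetD P idx 0 + 1
    let index := PySem.List.bisectRight C temp
    let el := if (index : Int) < N then PySem.List.pySetD el idx (N - (index : Int)) else el
    let el := if idx + 1 < (el.length : Int) then
        PySem.List.pySetD el idx (PySem.List.pyGetD el idx 0 + PySem.List.pyGetD el (idx + 1) 0)
      else el
    el) elements
  (PySem.List.pyRange 0 N 1).foldl (fun u idx =>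
    let temp := PySem.List.pyGetD salads idx 0 + 1
    let index := PySem.List.bisectRight P temp
    if (index : Int) < N then u + PySem.List.pyGetD elements (index : Int) 0 else u) uniqueTrips

-- ===== PORT B =====
-- the "while i < len(ss) and ss[i] + 1 < p: i += 1" loop; the pointer never passes
-- len(ss), so running it with fuel ss.length - i is exact
def advSaladIdxGo (ss : List Int) (p : Int) : Nat → Nat → Nat
  | 0, i => i
  | fuel + 1, i => if i < ss.length ∧ ss.getD i 0 + 1 < p then advSaladIdxGo ss p fuel (i + 1) else i

def advSaladIdx (ss : List Int) (p : Int) (i : Nat) : Nat :=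
  advSaladIdxGo ss p (ss.length - i) i

-- the "while j < len(cs) and cs[j] <= p + 1: j += 1" loop
def advCakeIdxGo (cs : List Int) (p : Int) : Nat → Nat → Nat
  | 0, j => j
  | fuel + 1, j => if j < cs.length ∧ cs.getD j 0 ≤ p + 1 then advCakeIdxGo cs p fuel (j + 1) else j

def advCakeIdx (cs : List Int) (p : Int) (j : Nat) : Nat :=
  advCakeIdxGo cs p (cs.length - j) j

def trips_alt (N : Int) (salads : List Int) (pizzas : List Int) (cakes : List Int) : Int :=
  let P := PySem.List.sorted pizzas (fun x => x) false
  let C := PySem.List.sorted cakes (fun x => x) false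
  let n : Int := max N 0
  let ss := PySem.List.sorted (PySem.List.slice salads none (some n)) (fun x => x) false
  let cs := PySem.List.slice C none (some n)
  ((PySem.List.slice P none (some n)).foldl (fun (st : Nat × Nat × Int) p =>
      let i := advSaladIdx ss p st.1
      let j := advCakeIdx cs p st.2.1
      (i, j, st.2.2 + (i : Int) * ((cs.length : Int) - (j : Int))))
    (0, 0, 0)).2.2

-- ===== PRECONDITION & SPEC =====
-- Pre_ is exactly A's return domain: with N > len(salads) or N > len(pizzas), A raises IndexError.
def Pre_trips (N : Int) (salads : List Int) (pizzas : List Int) (cakes : List Int) : Prop :=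
  N ≤ (salads.length : Int) ∧ N ≤ (pizzas.length : Int)
instance (N : Int) (salads : List Int) (pizzas : List Int) (cakes : List Int) : Decidable (Pre_trips N salads pizzas cakes) := by unfold Pre_trips; infer_instance
def pvWitness_trips : Int × List Int × List Int × List Int := (3, [0, 2, 0], [2, 3, 4], [4, 9, 9])

-- When len(cakes) < N and some of the first N salads is beaten by one of the N smallest
-- pizzas, A counts N - len(cakes) phantom positions past the end of the cake list as cakes
-- for every pizza, returning an inflated total; B counts only real cakes, the intended value.
def D_trips (N : Int) (salads : List Int) (pizzas : List Int) (cakes : List Int) : Prop :=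
  (cakes.length : Int) < N ∧
    ∃ s ∈ salads.take N.toNat, ((pizzas.countP (fun p => decide (p ≤ s + 1)) : Int)) < N
instance (N : Int) (salads : List Int) (pizzas : List Int) (cakes : List Int) : Decidable (D_trips N salads pizzas cakes) := by unfold D_trips; infer_instance

def Spec_trips (N : Int) (salads : List Int) (pizzas : List Int) (cakes : List Int) (out : Int) : Prop := ¬ D_trips N salads pizzas cakes → out = trips_alt N salads pizzas cakes
instance (N : Int) (salads : List Int) (pizzas : List Int) (cakes : List Int) (out : Int) : Decidable (Spec_trips N salads pizzas cakes out) := by unfold Spec_trips; infer_instance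

def pvDiffWitness_trips : Int × List Int × List Int × List Int := (1, [0], [5], [])
def pvDiffWitnessOut_trips : Int × Int := (1, 0)

-- ===== CLAIM (what is proved, stated in full; the proofs are below) =====
def Claim_unchanged_trips : Prop := ∀ (N : Int) (salads : List Int) (pizzas : List Int) (cakes : List Int), Dom_trips N salads pizzas cakes → Pre_trips N salads pizzas cakes → Spec_trips N salads pizzas cakes (trips N salads pizzas cakes)
def Claim_changed_trips : Prop := Dom_trips (pvDiffWitness_trips.1) (pvDiffWitness_trips.2.1) (pvDiffWitness_trips.2.2.1) (pvDiffWitness_trips.2.2.2) ∧ Pre_trips (pvDiffWitness_trips.1) (pvDiffWitness_trips.2.1) (pvDiffWitness_trips.2.2.1) (pvDiffWitness_trips.2.2.2) ∧ D_trips (pvDiffWitness_trips.1) (pvDiffWitness_trips.2.1) (pvDiffWitness_trips.2.2.1) (pvDiffWitness_trips.2.2.2) ∧ trips (pvDiffWitness_trips.1) (pvDiffWitness_trips.2.1) (pvDiffWitness_trips.2.2.1) (pvDiffWitness_trips.2.2.2) = pvDiffWitnessOut_trips.1 ∧ trips_alt (pvDiffWitness_trips.1) (pvDiffWitness_trips.2.1)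 (pvDiffWitness_trips.2.2.1) (pvDiffWitness_trips.2.2.2) = pvDiffWitnessOut_trips.2 ∧ pvDiffWitnessOut_trips.1 ≠ pvDiffWitnessOut_trips.2
def Claim_exact_trips : Prop := ∀ (N : Int) (salads : List Int) (pizzas : List Int) (cakes : List Int), Dom_trips N salads pizzas cakes → Pre_trips N salads pizzas cakes → D_trips N salads pizzas cakes → trips N salads pizzas cakes ≠ trips_alt N salads pizzas cakes

-- ===== LEMMAS AND PROOFS =====

-- the common per-pizza product sum both programs are reduced to
def tripsSpecSum (S P C : List Int) : Int :=
  (P.map (fun p => ((S.countP (fun s => decide (s + 1 < p)) : Int)) *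
                   ((C.countP (fun c => decide (p + 1 < c)) : Int)))).sum

lemma getD_set_eq (xs : List Int) (k j : Nat) (v : Int) :
    (xs.set k v).getD j 0 = if k = j ∧ j < xs.length then v else xs.getD j 0 := by
  simp only [List.getD_eq_getElem?_getD, List.getElem?_set]
  split_ifs with h1 h2 h3 h3 <;> simp_all <;> omega

lemma bisect_eq_countP (xs : List Int) (h : xs.Pairwise (· ≤ ·)) (x : Int) :
    PySem.List.bisectRight xs x = xs.countP (fun y => decide (y ≤ x)) := by
  obtain ⟨hle, hlo, hhi⟩ := PySem.List.bisectRight_spec xs x h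
  set b := PySem.List.bisectRight xs x with hb
  have hsplit : xs = xs.take b ++ xs.drop b := (List.take_append_drop b xs).symm
  have h1 : (xs.take b).countP (fun y => decide (y ≤ x)) = b := by
    have : (xs.take b).countP (fun y => decide (y ≤ x)) = (xs.take b).length := by
      rw [List.countP_eq_length]
      intro a ha
      obtain ⟨j, hj, rfl⟩ := List.mem_iff_getElem.mp ha
      have hjb : j < b := lt_of_lt_of_le hj (by simp)
      have hjl : j < xs.length := lt_of_lt_of_le hj (by simp [List.length_take])
      have := hlo j hjl hjb
      simp only [List.getElem_take] at *
      simpa using this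
    rw [this, List.length_take]; omega
  have h2 : (xs.drop b).countP (fun y => decide (y ≤ x)) = 0 := by
    rw [List.countP_eq_zero]
    intro a ha
    obtain ⟨j, hj, rfl⟩ := List.mem_iff_getElem.mp ha
    have hjl : b + j < xs.length := by simp [List.length_drop] at hj; omega
    have := hhi (b + j) hjl (by omega)
    simp only [List.getElem_drop] at *
    simp; omega
  conv_rhs => rw [hsplit]
  rw [List.countP_append, h1, h2]
  omega

-- dropWhile p l = drop (takeWhile p l).length l
lemma dropWhile_eq_drop (p : Int → Bool) (l : List Int) :
    l.dropWhile p = l.drop (l.takeWhile p).length := by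
  induction l with
  | nil => simp
  | cons a t ih =>
    by_cases h : p a <;> simp [List.dropWhile_cons, List.takeWhile_cons, h, ih]

-- for a sorted list and a downward-closed predicate, takeWhile counts all hits
lemma takeWhile_length_eq_countP (p : Int → Bool)
    (hmono : ∀ a b : Int, a ≤ b → p b = true → p a = true) :
    ∀ (l : List Int), l.Pairwise (· ≤ ·) → (l.takeWhile p).length = l.countP p := by
  intro l hl
  induction l with
  | nil => simp
  | cons a t ih =>
    rw [List.pairwise_cons] at hl
    by_cases h : p a
    · simp [List.takeWhile_cons, h, List.countP_cons, ih hl.2]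
    · have hz : t.countP p = 0 := by
        rw [List.countP_eq_zero]
        intro b hb hpb
        exact h (hmono a b (hl.1 b hb) hpb)
      simp [List.takeWhile_cons, h, List.countP_cons, hz]

lemma dropWhile_length_sorted (x : Int) (l : List Int) (hl : l.Pairwise (· ≤ ·)) :
    (l.dropWhile (fun c => decide (c ≤ x))).length = l.countP (fun c => decide (x < c)) := by
  have h1 := takeWhile_length_eq_countP (fun c => decide (c ≤ x))
    (by intro a b hab hb; simp at *; omega) l hl
  have h2 := List.length_eq_countP_add_countP (l := l) (fun c => decide (c ≤ x))
  have h3 : l.countP (fun a => decide ¬(decide (a ≤ x)) = true) = l.countP (fun c => decide (x < c)) := by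
    apply List.countP_congr; intro a _; simp [not_le]
  have h4 : (l.takeWhile (fun c => decide (c ≤ x))).length
      + (l.dropWhile (fun c => decide (c ≤ x))).length = l.length := by
    rw [← List.length_append, List.takeWhile_append_dropWhile]
  omega

-- for a sorted list, dropping the ≤x prefix is filtering for >x
lemma filter_eq_dropWhile (x : Int) :
    ∀ (l : List Int), l.Pairwise (· ≤ ·) →
      l.filter (fun p => decide (x < p)) = l.dropWhile (fun p => decide (p ≤ x)) := by
  intro l hl
  induction l with
  | nil => simp
  | cons a t ih =>
    rw [List.pairwise_cons] at hl
    by_cases h : a ≤ x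
    · simp only [List.filter_cons, List.dropWhile_cons]
      have : ¬ (x < a) := by omega
      simp [h, this, ih hl.2]
    · simp only [List.filter_cons, List.dropWhile_cons]
      have hx : x < a := by omega
      have : t.filter (fun p => decide (x < p)) = t := by
        rw [List.filter_eq_self]
        intro b hb
        have := hl.1 b hb; simp; omega
      simp [h, hx, this]

lemma takeWhile_length_add (q p : Int → Bool) (himp : ∀ s, q s = true → p s = true) :
    ∀ (l : List Int),
      (l.takeWhile q).length + ((l.dropWhile q).takeWhile p).length = (l.takeWhile p).length := by
  intro l
  induction l with
  | nil => simp
  | cons a t ih =>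
    by_cases h : q a
    · simp [List.takeWhile_cons, List.dropWhile_cons, h, himp a h]; omega
    · simp [List.takeWhile_cons, List.dropWhile_cons, h]

lemma advSaladIdxGo_eq (ss : List Int) (p : Int) : ∀ (fuel i : Nat), ss.length - i ≤ fuel →
    advSaladIdxGo ss p fuel i = i + ((ss.drop i).takeWhile (fun s => decide (s + 1 < p))).length := by
  intro fuel
  induction fuel with
  | zero =>
    intro i hi
    rw [advSaladIdxGo, List.drop_eq_nil_of_le (by omega)]
    simp
  | succ f ih =>
    intro i hi
    rw [advSaladIdxGo]
    by_cases h1 : i < ss.length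
    · have hg : ss.getD i 0 = ss[i] := by
        rw [List.getD_eq_getElem?_getD, List.getElem?_eq_getElem h1]; rfl
      by_cases h2 : ss.getD i 0 + 1 < p
      · rw [if_pos ⟨h1, h2⟩, ih (i + 1) (by omega),
          List.drop_eq_getElem_cons h1, List.takeWhile_cons,
          if_pos (by rw [← hg]; simpa using h2)]
        simp
        omega
      · rw [if_neg (by tauto), List.drop_eq_getElem_cons h1, List.takeWhile_cons,
          if_neg (by rw [← hg]; simpa using h2)]
        simp
    · rw [if_neg (by tauto), List.drop_eq_nil_of_le (by omega)]
      simp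

lemma advSaladIdx_eq (ss : List Int) (p : Int) (i : Nat) :
    advSaladIdx ss p i = i + ((ss.drop i).takeWhile (fun s => decide (s + 1 < p))).length :=
  advSaladIdxGo_eq ss p (ss.length - i) i le_rfl

lemma advCakeIdxGo_eq (cs : List Int) (p : Int) : ∀ (fuel j : Nat), cs.length - j ≤ fuel →
    advCakeIdxGo cs p fuel j = j + ((cs.drop j).takeWhile (fun c => decide (c ≤ p + 1))).length := by
  intro fuel
  induction fuel with
  | zero =>
    intro j hj
    rw [advCakeIdxGo, List.drop_eq_nil_of_le (by omega)]
    simp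
  | succ f ih =>
    intro j hj
    rw [advCakeIdxGo]
    by_cases h1 : j < cs.length
    · have hg : cs.getD j 0 = cs[j] := by
        rw [List.getD_eq_getElem?_getD, List.getElem?_eq_getElem h1]; rfl
      by_cases h2 : cs.getD j 0 ≤ p + 1
      · rw [if_pos ⟨h1, h2⟩, ih (j + 1) (by omega),
          List.drop_eq_getElem_cons h1, List.takeWhile_cons,
          if_pos (by rw [← hg]; simpa using h2)]
        simp
        omega
      · rw [if_neg (by tauto), List.drop_eq_getElem_cons h1, List.takeWhile_cons,
          if_neg (by rw [← hg]; simpa using h2)]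
        simp
    · rw [if_neg (by tauto), List.drop_eq_nil_of_le (by omega)]
      simp

lemma advCakeIdx_eq (cs : List Int) (p : Int) (j : Nat) :
    advCakeIdx cs p j = j + ((cs.drop j).takeWhile (fun c => decide (c ≤ p + 1))).length :=
  advCakeIdxGo_eq cs p (cs.length - j) j le_rfl

lemma bfold (S C : List Int) (hS : S.Pairwise (· ≤ ·)) (hC : C.Pairwise (· ≤ ·)) :
    ∀ (P : List Int), P.Pairwise (· ≤ ·) →
    ∀ (q r : Int → Bool), (∀ p ∈ P, ∀ s, q s = true → s + 1 < p) →
      (∀ p ∈ P, ∀ c, r c = true → c ≤ p + 1) → ∀ (t : Int),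
    (P.foldl (fun (st : Nat × Nat × Int) p =>
        let i := advSaladIdx S p st.1
        let j := advCakeIdx C p st.2.1
        (i, j, st.2.2 + (i : Int) * ((C.length : Int) - (j : Int))))
      ((S.takeWhile q).length, (C.takeWhile r).length, t)).2.2
    = t + tripsSpecSum S P C := by
  intro P
  induction P with
  | nil => intro _ q r _ _ t; simp [tripsSpecSum]
  | cons p P' ih =>
    intro hP q r hq hr t
    rw [List.pairwise_cons] at hP
    have himpS : ∀ s, q s = true → decide (s + 1 < p) = true := by
      intro s hs; simpa using hq p (by simp) s hs
    have himpC : ∀ c, r c = true → decide (c ≤ p + 1) = true := by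
      intro c hc; simpa using hr p (by simp) c hc
    set F := (fun (st : Nat × Nat × Int) p =>
        let i := advSaladIdx S p st.1
        let j := advCakeIdx C p st.2.1
        (i, j, st.2.2 + (i : Int) * ((C.length : Int) - (j : Int)))) with hF
    rw [List.foldl_cons]
    have hcntS : (S.takeWhile (fun s => decide (s + 1 < p))).length
        = S.countP (fun s => decide (s + 1 < p)) :=
      takeWhile_length_eq_countP _ (by intro a b hab hb; simp at *; omega) S hS
    have hlenC : (C.takeWhile (fun c => decide (c ≤ p + 1))).length
        + (C.dropWhile (fun c => decide (c ≤ p + 1))).length = C.length := by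
      rw [← List.length_append, List.takeWhile_append_dropWhile]
    have hck := dropWhile_length_sorted (p + 1) C hC
    have hstep : F ((S.takeWhile q).length, (C.takeWhile r).length, t) p
        = ((S.takeWhile (fun s => decide (s + 1 < p))).length,
           (C.takeWhile (fun c => decide (c ≤ p + 1))).length,
           t + ((S.countP (fun s => decide (s + 1 < p)) : Int)) *
               ((C.countP (fun c => decide (p + 1 < c)) : Int))) := by
      rw [hF]
      simp only [advSaladIdx_eq, advCakeIdx_eq, ← dropWhile_eq_drop,
        takeWhile_length_add _ _ himpS S, takeWhile_length_add _ _ himpC C]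
      rw [hcntS]
      have hcc : ((C.length : Int))
            - (((C.takeWhile (fun c => decide (c ≤ p + 1))).length : Int))
          = ((C.countP (fun c => decide (p + 1 < c)) : Int)) := by
        rw [← hck]; push_cast; omega
      rw [hcc]
    rw [hstep]
    rw [ih hP.2 _ _
      (by intro p' hp' s hs; simp at hs; have := hP.1 p' hp'; omega)
      (by intro p' hp' c hc; simp at hc; have := hP.1 p' hp'; omega)]
    simp [tripsSpecSum]
    ring

lemma sorted_pairwise_le (xs : List Int) :
    (PySem.List.sorted xs (fun x => x) false).Pairwise (· ≤ ·) := by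
  simpa using PySem.List.sorted_pairwise xs (fun x => x)

lemma sum_map_ite_const (c : Int) (q : Int → Bool) : ∀ (S : List Int),
    (S.map (fun s => if q s then c else 0)).sum = ((S.countP q : Int)) * c := by
  intro S
  induction S with
  | nil => simp
  | cons a t ih =>
    by_cases h : q a <;> simp [h, ih, List.countP_cons] <;> push_cast <;> ring

lemma swap_sum (S : List Int) (cc : Int → Int) : ∀ (P : List Int),
    (S.map (fun s => ((P.filter (fun p => decide (s + 1 < p))).map cc).sum)).sum
      = (P.map (fun p => ((S.countP (fun s => decide (s + 1 < p)) : Int)) * cc p)).sum := by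
  intro P
  induction P with
  | nil => simp
  | cons p P' ih =>
    have hmap : (S.map (fun s => (((p :: P').filter (fun q => decide (s + 1 < q))).map cc).sum))
        = S.map (fun s => (if decide (s + 1 < p) then cc p else 0)
            + ((P'.filter (fun q => decide (s + 1 < q))).map cc).sum) := by
      refine List.map_congr_left ?_
      intro s _
      by_cases h : s + 1 < p <;> simp [List.filter_cons, h]
    rw [hmap, PySem.List.sum_map_add_int, sum_map_ite_const, ih]
    simp


-- per-pizza cake value A stores: N - bisect(cakes, p+1) when that bisect is < N, else 0
def ccA (C : List Int) (n : Nat) (p : Int) : Int :=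
  if C.countP (fun c => decide (c ≤ p + 1)) < n
  then (n : Int) - ((C.countP (fun c => decide (c ≤ p + 1))) : Int) else 0

def gA (C P : List Int) (n j : Nat) : Int := ccA C n (P.getD j 0)

-- the suffix sums A's elements array holds after the first loop
def EA (C P : List Int) (n k : Nat) : Int :=
  ((List.range (n - k)).map (fun i => gA C P n (k + i))).sum

lemma EA_top (C P : List Int) {n k : Nat} (h : n ≤ k) : EA C P n k = 0 := by
  simp [EA, Nat.sub_eq_zero_of_le h]

lemma EA_succ (C P : List Int) {n k : Nat} (h : k < n) :
    EA C P n k = gA C P n k + EA C P n (k + 1) := by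
  have hnk : n - k = (n - (k + 1)) + 1 := by omega
  rw [EA, hnk, List.range_succ_eq_map]
  simp only [List.map_cons, List.sum_cons, List.map_map, Nat.add_zero]
  rw [EA]
  congr 2
  refine List.map_congr_left ?_
  intro i _
  simp only [Function.comp_apply]
  congr 1
  omega

lemma afold1 (P C : List Int) (n : Nat) (hC : C.Pairwise (· ≤ ·)) :
    ∀ (k : Nat), k ≤ n → ∀ (el : List Int), el.length = n →
    (∀ j : Nat, j < n → k ≤ j → el.getD j 0 = EA C P n j) →
    (∀ j : Nat, j < k → el.getD j 0 = 0) →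
    ∀ j : Nat, j < n →
    ((PySem.List.pyRange ((k : Int) - 1) (-1) (-1)).foldl (fun el idx =>
       let temp := PySem.List.pyGetD P idx 0 + 1
       let index := PySem.List.bisectRight C temp
       let el := if (index : Int) < ((n : Nat) : Int) then PySem.List.pySetD el idx (((n : Nat) : Int) - (index : Int)) else el
       let el := if idx + 1 < (el.length : Int) then
           PySem.List.pySetD el idx (PySem.List.pyGetD el idx 0 + PySem.List.pyGetD el (idx + 1) 0)
         else el
       el) el).getD j 0 = EA C P n j := by
  intro k
  induction k with
  | zero =>
    intro _ el _ hE _ j hj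
    rw [PySem.List.pyRange_neg_one_eq_nil (by norm_num), List.foldl_nil]
    exact hE j hj (Nat.zero_le j)
  | succ k ih =>
    intro hkn el hlen hE h0 j hj
    have hk : k < n := by omega
    set F := (fun (el : List Int) (idx : Int) =>
       let temp := PySem.List.pyGetD P idx 0 + 1
       let index := PySem.List.bisectRight C temp
       let el := if (index : Int) < ((n : Nat) : Int) then PySem.List.pySetD el idx (((n : Nat) : Int) - (index : Int)) else el
       let el := if idx + 1 < (el.length : Int) then
           PySem.List.pySetD el idx (PySem.List.pyGetD el idx 0 + PySem.List.pyGetD el (idx + 1) 0)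
         else el
       el) with hF
    have h1 : ((k + 1 : Nat) : Int) - 1 = (k : Int) := by push_cast; ring
    rw [h1, PySem.List.pyRange_neg_one_cons (by omega : (-1 : Int) < (k : Int)), List.foldl_cons]
    set i1 := C.countP (fun c => decide (c ≤ P.getD k 0 + 1)) with hi1
    have hbis : PySem.List.bisectRight C (P.getD k 0 + 1) = i1 := bisect_eq_countP C hC _
    have hc1 : (k : Int) + 1 = ((k + 1 : Nat) : Int) := by push_cast; ring
    have hstep : F el (k : Int) = el.set k (EA C P n k) := by
      rw [hF]
      simp only [PySem.List.pyGetD_natCast, PySem.List.pySetD_natCast, hbis,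
        List.length_set, hlen, hc1, Nat.cast_lt]
      rcases Nat.lt_or_ge i1 n with hA | hA
      · have hgAk : gA C P n k = (n : Int) - (i1 : Int) := by
          simp only [gA, ccA, ← hi1, if_pos hA]
        rw [if_pos hA]
        have hlen2 : (el.set k ((n : Int) - (i1 : Int))).length = n := by simp [hlen]
        rw [hlen2]
        by_cases hB : k + 1 < n
        · rw [if_pos hB, List.set_set]
          congr 1
          rw [getD_set_eq, getD_set_eq,
            if_pos (show k = k ∧ k < el.length by omega),
            if_neg (show ¬ (k = k + 1 ∧ k + 1 < el.length) by omega)]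
          rw [hE (k + 1) hB (by omega), EA_succ C P hk, hgAk]
        · rw [if_neg hB]
          congr 1
          rw [EA_succ C P hk, EA_top C P (by omega : n ≤ k + 1), hgAk]
          ring
      · have hgAk : gA C P n k = 0 := by
          simp only [gA, ccA, ← hi1, if_neg (by omega : ¬ i1 < n)]
        rw [if_neg (by omega : ¬ i1 < n)]
        by_cases hB : k + 1 < n
        · rw [hlen, if_pos hB]
          congr 1
          rw [h0 k (by omega), hE (k + 1) hB (by omega), EA_succ C P hk, hgAk]
        · rw [hlen, if_neg hB]
          have hz : EA C P n k = 0 := by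
            rw [EA_succ C P hk, EA_top C P (by omega : n ≤ k + 1), hgAk]; ring
          rw [hz, ← h0 k (by omega)]
          have hkel : k < el.length := by omega
          rw [List.getD_eq_getElem?_getD, List.getElem?_eq_getElem hkel]
          simp
    rw [hstep]
    exact ih (by omega) (el.set k (EA C P n k)) (by simp [hlen])
      (by
        intro j' hj' hkj'
        rw [getD_set_eq]
        rcases Nat.eq_or_lt_of_le hkj' with h | h
        · rw [if_pos ⟨h.symm ▸ rfl, by omega⟩]
          exact h ▸ rfl
        · rw [if_neg (by omega)]
          exact hE j' hj' (by omega))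
      (by
        intro j' hj'
        rw [getD_set_eq, if_neg (by omega)]
        exact h0 j' (by omega))
      j hj

lemma takeWhile_take (p : Int → Bool) : ∀ (l : List Int) (n : Nat),
    (l.take n).takeWhile p = (l.takeWhile p).take n := by
  intro l
  induction l with
  | nil => intro n; simp
  | cons a t ih =>
    intro n
    cases n with
    | zero => simp
    | succ m =>
      by_cases h : p a <;> simp [List.takeWhile_cons, h, ih]

lemma pairwise_take (l : List Int) (n : Nat) (hl : l.Pairwise (· ≤ ·)) :
    (l.take n).Pairwise (· ≤ ·) := hl.sublist (List.take_sublist n l)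

lemma countP_take_sorted (p : Int → Bool)
    (hmono : ∀ a b : Int, a ≤ b → p b = true → p a = true)
    (l : List Int) (hl : l.Pairwise (· ≤ ·)) (n : Nat) :
    (l.take n).countP p = min (l.countP p) n := by
  rw [← takeWhile_length_eq_countP p hmono (l.take n) (pairwise_take l n hl),
    takeWhile_take, List.length_take, takeWhile_length_eq_countP p hmono l hl]
  omega

lemma EA_drop (C P : List Int) (n : Nat) (hPn : n ≤ P.length) :
    ∀ (m k : Nat), k + m = n →
      EA C P n k = (((P.take n).drop k).map (ccA C n)).sum := by
  intro m
  induction m with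
  | zero =>
    intro k hk
    rw [EA_top C P (by omega)]
    rw [List.drop_eq_nil_of_le (by simp; omega)]
    simp
  | succ m ih =>
    intro k hk
    have hkn : k < n := by omega
    have hkt : k < (P.take n).length := by simp; omega
    rw [EA_succ C P hkn, List.drop_eq_getElem_cons hkt, List.map_cons,
      List.sum_cons, ih (k + 1) (by omega)]
    congr 1
    rw [gA]
    congr 1
    rw [List.getElem_take, List.getD_eq_getElem?_getD,
      List.getElem?_eq_getElem (by omega : k < P.length)]
    rfl

lemma foldl_pyRange_take (xs : List Int) (n : Nat) (hn : n ≤ xs.length)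
    (f : Int → Int → Int) (init : Int) :
    (PySem.List.pyRange 0 (n : Int) 1).foldl
        (fun u j => f u (PySem.List.pyGetD xs j 0)) init
      = (xs.take n).foldl f init := by
  have h := PySem.List.foldl_pyRange_zero_pyGetD' (xs.take n) 0 f init
  beta_reduce at h
  rw [List.length_take, Nat.min_eq_left hn] at h
  rw [← h]
  apply List.foldl_ext
  intro a j hj
  have hj' := (PySem.List.mem_pyRange_one).mp hj
  congr 1
  rw [PySem.List.pyGetD_eq_getElem _ _ (by omega)
      (by first
          | omega
          | (rw [List.length_take]; push_cast; omega)),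
    PySem.List.pyGetD_eq_getElem _ _ (by omega)
      (by first
          | omega
          | (rw [List.length_take]; push_cast; omega))]
  exact (List.getElem_take).symm

-- the sum A's two loops compute
def tripsSumA (S P C : List Int) (n : Nat) : Int :=
  (P.map (fun p => ((S.countP (fun s => decide (s + 1 < p)) : Int)) * ccA C n p)).sum

lemma trips_eq (N : Int) (salads pizzas cakes : List Int)
    (hS : N ≤ (salads.length : Int)) (hP : N ≤ (pizzas.length : Int)) :
    trips N salads pizzas cakes
      = tripsSumA (salads.take N.toNat)
          ((PySem.List.sorted pizzas (fun x => x) false).take N.toNat)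
          (PySem.List.sorted cakes (fun x => x) false) N.toNat := by
  rcases (by omega : N ≤ 0 ∨ 0 < N) with hN0 | hN0
  · have hn0 : N.toNat = 0 := by omega
    simp only [trips, hn0,
      PySem.List.pyRange_neg_one_eq_nil (by omega : N - 1 ≤ -1),
      PySem.List.pyRange_one_eq_nil (by omega : N ≤ 0), List.foldl_nil]
    simp [tripsSumA]
  · set n := N.toNat with hn
    have hNn : N = (n : Int) := by omega
    set P := PySem.List.sorted pizzas (fun x => x) false with hPdef
    set C := PySem.List.sorted cakes (fun x => x) false with hCdef
    have hPpw : P.Pairwise (· ≤ ·) := sorted_pairwise_le pizzas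
    have hCpw : C.Pairwise (· ≤ ·) := sorted_pairwise_le cakes
    have hPlen : n ≤ P.length := by
      rw [hPdef, PySem.List.length_sorted]; omega
    have hSlen : n ≤ salads.length := by omega
    simp only [trips, hNn, Int.toNat_natCast]
    have hElems := afold1 P C n hCpw n le_rfl
      (List.replicate n 0) (by simp)
      (by intro j hj hnj; omega)
      (by intro j hj
          rw [List.getD_eq_getElem?_getD, List.getElem?_replicate]
          simp [hj])
    set elems := ((PySem.List.pyRange ((n : Int) - 1) (-1) (-1)).foldl (fun el idx =>
       let temp := PySem.List.pyGetD P idx 0 + 1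
       let index := PySem.List.bisectRight C temp
       let el := if (index : Int) < ((n : Nat) : Int) then PySem.List.pySetD el idx (((n : Nat) : Int) - (index : Int)) else el
       let el := if idx + 1 < (el.length : Int) then
           PySem.List.pySetD el idx (PySem.List.pyGetD el idx 0 + PySem.List.pyGetD el (idx + 1) 0)
         else el
       el) (List.replicate n 0)) with helems
    rw [foldl_pyRange_take salads n hSlen
      (fun u s => if ((PySem.List.bisectRight P (s + 1) : Nat) : Int) < ((n : Nat) : Int)
        then u + PySem.List.pyGetD elems ((PySem.List.bisectRight P (s + 1) : Nat) : Int) 0 else u) 0]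
    have hbody : ∀ (u : Int), ∀ s ∈ salads.take n,
        (if ((PySem.List.bisectRight P (s + 1) : Nat) : Int) < ((n : Nat) : Int)
          then u + PySem.List.pyGetD elems ((PySem.List.bisectRight P (s + 1) : Nat) : Int) 0 else u)
        = u + (((P.take n).filter (fun p => decide (s + 1 < p))).map (ccA C n)).sum := by
      intro u s _
      have hmono : ∀ a b : Int, a ≤ b → decide (b ≤ s + 1) = true → decide (a ≤ s + 1) = true := by
        intro a b hab hb; simp at *; omega
      have hbs : PySem.List.bisectRight P (s + 1) = P.countP (fun y => decide (y ≤ s + 1)) :=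
        bisect_eq_countP P hPpw (s + 1)
      have hfil : ((P.take n).filter (fun p => decide (s + 1 < p))).map (ccA C n)
          = ((P.take n).drop (min (P.countP (fun y => decide (y ≤ s + 1))) n)).map (ccA C n) := by
        rw [filter_eq_dropWhile (s + 1) (P.take n) (pairwise_take P n hPpw),
          dropWhile_eq_drop,
          takeWhile_length_eq_countP _ hmono (P.take n) (pairwise_take P n hPpw),
          countP_take_sorted _ hmono P hPpw]
      by_cases hlt : PySem.List.bisectRight P (s + 1) < n
      · rw [if_pos (by exact_mod_cast hlt), PySem.List.pyGetD_natCast,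
          hElems _ hlt, EA_drop C P n hPlen (n - PySem.List.bisectRight P (s + 1)) _ (by omega),
          hfil, hbs, Nat.min_eq_left (by omega)]
      · rw [if_neg (by exact_mod_cast hlt), hfil,
          List.drop_eq_nil_of_le (by rw [List.length_take]; omega)]
        simp
    rw [List.foldl_ext _ _ 0 hbody, PySem.List.foldl_add, swap_sum, tripsSumA]
    simp

lemma trips_alt_eq (N : Int) (salads pizzas cakes : List Int) :
    trips_alt N salads pizzas cakes
      = tripsSpecSum (salads.take N.toNat)
          ((PySem.List.sorted pizzas (fun x => x) false).take N.toNat)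
          ((PySem.List.sorted cakes (fun x => x) false).take N.toNat) := by
  have htn : (max N 0) = (N.toNat : Int) := by omega
  have htake : ∀ (l : List Int), (l.takeWhile (fun (_ : Int) => false)).length = 0 := by
    intro l; cases l <;> simp [List.takeWhile_cons]
  have h := bfold (PySem.List.sorted (salads.take N.toNat) (fun x => x) false)
      ((PySem.List.sorted cakes (fun x => x) false).take N.toNat)
      (sorted_pairwise_le _) (pairwise_take _ _ (sorted_pairwise_le cakes))
      ((PySem.List.sorted pizzas (fun x => x) false).take N.toNat)
      (pairwise_take _ _ (sorted_pairwise_le pizzas))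
      (fun _ => false) (fun _ => false) (by simp) (by simp) 0
  rw [htake, htake] at h
  simp only [trips_alt, htn, PySem.List.slice_to_natCast]
  push_cast at h
  rw [h]
  simp only [tripsSpecSum, zero_add]
  congr 1
  refine List.map_congr_left ?_
  intro p _
  rw [List.Perm.countP_eq _ (PySem.List.sorted_perm (salads.take N.toNat) (fun x => x) false)]

lemma ccA_eq_take (C : List Int) (n : Nat) (hC : C.Pairwise (· ≤ ·)) (hn : n ≤ C.length)
    (p : Int) : ccA C n p = (((C.take n).countP (fun c => decide (p + 1 < c))) : Int) := by
  have hmono : ∀ a b : Int, a ≤ b → decide (b ≤ p + 1) = true → decide (a ≤ p + 1) = true := by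
    intro a b hab hb; simp at *; omega
  have h1 : (C.take n).countP (fun c => decide (c ≤ p + 1))
      = min (C.countP (fun c => decide (c ≤ p + 1))) n :=
    countP_take_sorted _ hmono C hC n
  have h2 := List.length_eq_countP_add_countP (l := C.take n) (fun c => decide (c ≤ p + 1))
  have h3 : (C.take n).countP (fun a => decide ¬(decide (a ≤ p + 1)) = true)
      = (C.take n).countP (fun c => decide (p + 1 < c)) := by
    apply List.countP_congr; intro a _; simp [not_le]
  rw [h3] at h2
  have h4 : (C.take n).length = n := by rw [List.length_take]; omega
  rw [ccA]
  split_ifs with h <;> omega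

lemma takeWhile_eq_take (p : Int → Bool) : ∀ (l : List Int),
    l.takeWhile p = l.take (l.takeWhile p).length := by
  intro l
  induction l with
  | nil => simp
  | cons a t ih =>
    by_cases h : p a <;> simp [List.takeWhile_cons, h] <;> exact ih

lemma mem_take_le (P : List Int) (hP : P.Pairwise (· ≤ ·)) (n : Nat) (s : Int)
    (hcnt : n ≤ P.countP (fun y => decide (y ≤ s + 1))) :
    ∀ p ∈ P.take n, p ≤ s + 1 := by
  intro p hp
  have hmono : ∀ a b : Int, a ≤ b → decide (b ≤ s + 1) = true → decide (a ≤ s + 1) = true := by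
    intro a b hab hb; simp at *; omega
  have htw : (P.takeWhile (fun y => decide (y ≤ s + 1))).length
      = P.countP (fun y => decide (y ≤ s + 1)) :=
    takeWhile_length_eq_countP _ hmono P hP
  have hsub : P.take n = (P.takeWhile (fun y => decide (y ≤ s + 1))).take n := by
    conv_rhs => rw [takeWhile_eq_take (fun y => decide (y ≤ s + 1)) P]
    rw [List.take_take, Nat.min_eq_left (by omega)]
  rw [hsub] at hp
  have := List.mem_takeWhile_imp (List.take_subset n _ hp)
  simpa using this

lemma dropWhile_eq_cons_imp (q : Int → Bool) : ∀ (l : List Int) (a : Int) (rest : List Int),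
    l.dropWhile q = a :: rest → q a = false := by
  intro l
  induction l with
  | nil => intro a rest h; simp at h
  | cons x t ih =>
    intro a rest h
    by_cases hx : q x
    · rw [List.dropWhile_cons, if_pos hx] at h
      exact ih a rest h
    · rw [List.dropWhile_cons, if_neg hx] at h
      cases h
      simpa using hx

lemma sum_map_pos (f : Int → Int) : ∀ (l : List Int), (∀ x ∈ l, 0 ≤ f x) →
    ∀ (x0 : Int), x0 ∈ l → 0 < f x0 → 0 < (l.map f).sum := by
  intro l
  induction l with
  | nil => intro _ x0 h; simp at h
  | cons a t ih =>
    intro hnn x0 hx0 hpos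
    rw [List.map_cons, List.sum_cons]
    have hts : 0 ≤ (t.map f).sum := by
      apply List.sum_nonneg
      intro x hx
      obtain ⟨y, hy, rfl⟩ := List.mem_map.mp hx
      exact hnn y (List.mem_cons_of_mem a hy)
    rcases List.mem_cons.mp hx0 with rfl | hx0t
    · have := hpos; omega
    · have h1 : 0 ≤ f a := hnn a (List.mem_cons_self)
      have h2 := ih (fun x hx => hnn x (List.mem_cons_of_mem a hx)) x0 hx0t hpos
      omega

-- ===== VERDICT (by name: the statements are the Claim_ definitions above) =====
theorem trips_spec : Claim_unchanged_trips := by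
  intro N salads pizzas cakes _ hPre hnD
  obtain ⟨hS, hP⟩ := hPre
  unfold D_trips at hnD
  push_neg at hnD
  rw [trips_eq N salads pizzas cakes hS hP, trips_alt_eq]
  by_cases hc : N ≤ (cakes.length : Int)
  · have hn : N.toNat ≤ (PySem.List.sorted cakes (fun x => x) false).length := by
      rw [PySem.List.length_sorted]; omega
    unfold tripsSumA tripsSpecSum
    congr 1
    refine List.map_congr_left ?_
    intro p _
    rw [ccA_eq_take _ _ (sorted_pairwise_le cakes) hn p]
  · have hno := hnD (by omega)
    have hz : ∀ p ∈ (PySem.List.sorted pizzas (fun x => x) false).take N.toNat,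
        (salads.take N.toNat).countP (fun s => decide (s + 1 < p)) = 0 := by
      intro p hp
      rw [List.countP_eq_zero]
      intro s hs hps
      have h1 := hno s hs
      have h2 : N.toNat ≤ (PySem.List.sorted pizzas (fun x => x) false).countP
          (fun y => decide (y ≤ s + 1)) := by
        rw [List.Perm.countP_eq _ (PySem.List.sorted_perm pizzas (fun x => x) false)]
        omega
      have := mem_take_le _ (sorted_pairwise_le pizzas) N.toNat s h2 p hp
      simp at hps
      omega
    unfold tripsSumA tripsSpecSum
    rw [List.map_congr_left (fun p hp => by rw [hz p hp]; simp :
        ∀ p ∈ (PySem.List.sorted pizzas (fun x => x) false).take N.toNat,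
          (((salads.take N.toNat).countP (fun s => decide (s + 1 < p)) : Int))
            * ccA (PySem.List.sorted cakes (fun x => x) false) N.toNat p = 0),
      List.map_congr_left (fun p hp => by rw [hz p hp]; simp :
        ∀ p ∈ (PySem.List.sorted pizzas (fun x => x) false).take N.toNat,
          (((salads.take N.toNat).countP (fun s => decide (s + 1 < p)) : Int))
            * ((((PySem.List.sorted cakes (fun x => x) false).take N.toNat).countP
                (fun c => decide (p + 1 < c)) : Int)) = 0)]

theorem trips_changed : Claim_changed_trips := by
  unfold Claim_changed_trips
  decide

theorem trips_tight : Claim_exact_trips := by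
  intro N salads pizzas cakes _ hPre hD
  obtain ⟨hS, hP⟩ := hPre
  obtain ⟨hc, s0, hs0mem, hs0cnt⟩ := hD
  rw [trips_eq N salads pizzas cakes hS hP, trips_alt_eq]
  set n := N.toNat with hn
  set P := PySem.List.sorted pizzas (fun x => x) false with hPdef
  set C := PySem.List.sorted cakes (fun x => x) false with hCdef
  have hPpw : P.Pairwise (· ≤ ·) := sorted_pairwise_le pizzas
  have hClen : C.length = cakes.length := PySem.List.length_sorted _ _ _
  have hPlen : P.length = pizzas.length := PySem.List.length_sorted _ _ _
  have hCn : C.length < n := by omega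
  have htakeC : C.take n = C := List.take_of_length_le (by omega)
  rw [htakeC]
  set pad : Int := (n : Int) - (C.length : Int) with hpad
  have hpadpos : 0 < pad := by omega
  have hpoint : ∀ p : Int, ccA C n p
      = ((C.countP (fun c => decide (p + 1 < c))) : Int) + pad := by
    intro p
    have hle : C.countP (fun c => decide (c ≤ p + 1)) ≤ C.length := List.countP_le_length
    have hsum := List.length_eq_countP_add_countP (l := C) (fun c => decide (c ≤ p + 1))
    have hcompl : C.countP (fun a => decide ¬(decide (a ≤ p + 1)) = true)
        = C.countP (fun c => decide (p + 1 < c)) := by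
      apply List.countP_congr; intro a _; simp [not_le]
    rw [hcompl] at hsum
    rw [ccA, if_pos (by omega)]
    omega
  have hsplit : tripsSumA (salads.take n) (P.take n) C n
      = tripsSpecSum (salads.take n) (P.take n) C
        + ((P.take n).map (fun p =>
            (((salads.take n).countP (fun s => decide (s + 1 < p)) : Int)) * pad)).sum := by
    unfold tripsSumA tripsSpecSum
    rw [← PySem.List.sum_map_add_int]
    congr 1
    refine List.map_congr_left ?_
    intro p _
    rw [hpoint p]
    ring
  rw [hsplit]
  have hpos : 0 < ((P.take n).map (fun p =>
      (((salads.take n).countP (fun s => decide (s + 1 < p)) : Int)) * pad)).sum := by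
    have hmono : ∀ a b : Int, a ≤ b → decide (b ≤ s0 + 1) = true → decide (a ≤ s0 + 1) = true := by
      intro a b hab hb; simp at *; omega
    have hip : P.countP (fun y => decide (y ≤ s0 + 1)) < n := by
      rw [List.Perm.countP_eq _ (PySem.List.sorted_perm pizzas (fun x => x) false)]
      omega
    have hipP : P.countP (fun y => decide (y ≤ s0 + 1)) < P.length := by omega
    have hdw : P.dropWhile (fun y => decide (y ≤ s0 + 1))
        = P.drop (P.countP (fun y => decide (y ≤ s0 + 1))) := by
      rw [dropWhile_eq_drop, takeWhile_length_eq_countP _ hmono P hPpw]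
    have hcons := List.drop_eq_getElem_cons hipP
    rw [← hdw] at hcons
    have hq0 := dropWhile_eq_cons_imp _ P _ _ hcons
    have hs0p0 : s0 + 1 < P[P.countP (fun y => decide (y ≤ s0 + 1))] := by
      simp at hq0; omega
    have hp0mem : P[P.countP (fun y => decide (y ≤ s0 + 1))] ∈ P.take n := by
      have hb : P.countP (fun y => decide (y ≤ s0 + 1)) < (P.take n).length := by
        rw [List.length_take]; omega
      have h1 : (P.take n)[P.countP (fun y => decide (y ≤ s0 + 1))]'hb
          = P[P.countP (fun y => decide (y ≤ s0 + 1))] := List.getElem_take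
      rw [← h1]
      exact List.getElem_mem hb
    apply sum_map_pos _ _
      (by
        intro x _
        exact mul_nonneg (Int.natCast_nonneg _) (le_of_lt hpadpos))
      _ hp0mem
    apply mul_pos _ hpadpos
    have : 0 < (salads.take n).countP (fun s => decide (s + 1
        < P[P.countP (fun y => decide (y ≤ s0 + 1))])) :=
      List.countP_pos_iff.mpr ⟨s0, hs0mem, by simp; omega⟩
    exact_mod_cast this
  omega
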